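-- pv_equiv track=rewrite | github.com/MrBrantCode/unitest_baseline | mut_generate/mist_train_cf/cf_69583/solution.py | custom_concatenate
-- ===== SOURCE A (Python) =====
-- from typing import List
--
-- def custom_concatenate(strings: List[str]) -> str:
--     """ Concatenate list of strings into a single string using a personalized interleaving and reversing approach """
--     if not strings:
--         return ""
--
--     interleaved_chars = []
--     max_len = max(len(s) for s in strings)
--
--     for i in range(max_len):
--         for string in strings:
--             if i < len(string):
--                 interleaved_chars.append(string[i])
--
--     result_string = "".join(interleaved_chars[::-1])
--
--     return result_string
-- ===== SOURCE B (Python) =====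
-- from typing import List
--
-- def custom_concatenate(strings: List[str]) -> str:
--     """Bucket each character by its column index in one pass, then concatenate the buckets and reverse."""
--     buckets = []
--     for s in strings:
--         for i, ch in enumerate(s):
--             if i == len(buckets):
--                 buckets.append([ch])
--             else:
--                 buckets[i].append(ch)
--     return ''.join(''.join(b) for b in buckets)[::-1]
-- ===== Notes on version B (the rewrite author's own statement) =====
-- stated objective: alternative
-- what changed: Replaces A's column-by-column rescan of every string (range(max_len) x strings with a length test each round) by a single pass over the characters that buckets each char by its column index, then concatenates the buckets and reverses; avoids A's per-column scan of short strings on skewed lengths.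
import Mathlib
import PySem

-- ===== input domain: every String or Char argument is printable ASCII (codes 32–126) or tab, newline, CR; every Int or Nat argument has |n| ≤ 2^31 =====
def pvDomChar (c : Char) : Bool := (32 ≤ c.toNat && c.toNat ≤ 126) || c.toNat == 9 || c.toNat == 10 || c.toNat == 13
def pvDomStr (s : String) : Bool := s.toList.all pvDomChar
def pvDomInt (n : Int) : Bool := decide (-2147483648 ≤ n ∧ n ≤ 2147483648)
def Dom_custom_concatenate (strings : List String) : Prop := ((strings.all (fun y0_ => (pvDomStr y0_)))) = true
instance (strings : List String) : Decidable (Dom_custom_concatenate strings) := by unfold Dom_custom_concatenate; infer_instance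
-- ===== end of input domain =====

-- B buckets every character by its column index in one pass over the characters,
-- instead of A's per-column rescan of every string; equivalence proved below.

-- ===== PORT A =====
def custom_concatenate (strings : List String) : String :=
  if strings = [] then "" else
    -- max(len(s) for s in strings); lengths are Nats, so Python's max is List.max?
    let maxLen := ((strings.map (fun s => s.toList.length)).max?).getD 0
    -- for i in range(max_len): for string in strings: if i < len(string): append(string[i])
    let interleaved := (List.range maxLen).foldl
      (fun acc i => strings.foldl
        (fun acc s => if i < s.toList.length then acc ++ [s.toList.getD i ' '] else acc) acc) []
    -- "".join(interleaved_chars[::-1])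
    String.ofList interleaved.reverse

-- ===== PORT B =====
-- one enumerate step of B: if i == len(buckets): buckets.append([ch]) else buckets[i].append(ch)
def bstep (bs : List (List Char)) (p : Int × Char) : List (List Char) :=
  if p.1 = (bs.length : Int) then bs ++ [[p.2]]
  else bs.modify p.1.toNat (· ++ [p.2])   -- p.1 comes from enumerate, hence ≥ 0: toNat is exact

def custom_concatenate_alt (strings : List String) : String :=
  let buckets := strings.foldl (fun bs s => (PySem.List.enumerate s.toList).foldl bstep bs) []
  -- ''.join(''.join(b) for b in buckets)[::-1]
  String.ofList buckets.flatten.reverse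

-- ===== PRECONDITION & SPEC =====
def Spec_custom_concatenate (strings : List String) (out : String) : Prop := out = custom_concatenate_alt strings
instance (strings : List String) (out : String) : Decidable (Spec_custom_concatenate strings out) := by unfold Spec_custom_concatenate; infer_instance

-- ===== CLAIM (what is proved, stated in full; the proofs are below) =====
def Claim_equal_custom_concatenate : Prop := ∀ (strings : List String), Dom_custom_concatenate strings → Spec_custom_concatenate strings (custom_concatenate strings)

-- ===== LEMMAS AND PROOFS =====

-- column i of the input: the characters string[i] of the strings that are long enough
def colE (strings : List String) (i : Nat) : List Char :=
  strings.filterMap (fun s => s.toList[i]?)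

-- merging one string into the buckets, column by column
def mergeCol : List (List Char) → List Char → List (List Char)
  | bs, [] => bs
  | [], c :: cs => [c] :: mergeCol [] cs
  | b :: bs, c :: cs => (b ++ [c]) :: mergeCol bs cs

theorem fold_bstep : ∀ (cs : List Char) (bs : List (List Char)) (k : Nat), k ≤ bs.length →
    (PySem.List.enumerate cs (k : Int)).foldl bstep bs = bs.take k ++ mergeCol (bs.drop k) cs := by
  intro cs
  induction cs with
  | nil => intro bs k h; simp [PySem.List.enumerate, mergeCol]
  | cons c cs ih =>
    intro bs k h
    rw [PySem.List.enumerate_cons, List.foldl_cons]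
    by_cases hk : k = bs.length
    · have hdrop : bs.drop k = [] := by simp [hk]
      have hb : bstep bs ((k : Int), c) = bs ++ [[c]] := by simp [bstep, hk]
      rw [hb]
      have : ((k : Int) + 1) = ((k + 1 : Nat) : Int) := by push_cast; ring
      rw [this, ih (bs ++ [[c]]) (k + 1) (by simp [hk])]
      have h1 : (bs ++ [[c]]).take (k + 1) = bs ++ [[c]] := by
        apply List.take_of_length_le; simp [hk]
      have h2 : (bs ++ [[c]]).drop (k + 1) = [] := by
        apply List.drop_of_length_le; simp [hk]
      rw [h1, h2, List.take_of_length_le (le_of_eq hk.symm), hdrop]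
      simp [mergeCol]
    · have hlt : k < bs.length := lt_of_le_of_ne h hk
      have hb : bstep bs ((k : Int), c) = bs.modify k (· ++ [c]) := by
        simp [bstep]
        intro he; exact absurd (by exact_mod_cast he) hk
      rw [hb]
      have : ((k : Int) + 1) = ((k + 1 : Nat) : Int) := by push_cast; ring
      rw [this, ih _ (k + 1) (by simpa using hlt)]
      rw [List.modify_eq_take_cons_drop hlt]
      have hlen : (bs.take k).length = k := by simp [le_of_lt hlt]
      have h1 : (bs.take k ++ (bs[k] ++ [c]) :: bs.drop (k + 1)).take (k + 1)
          = bs.take k ++ [bs[k] ++ [c]] := by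
        rw [List.take_append, hlen]; simp [List.take_of_length_le (by rw [hlen]; omega : (bs.take k).length ≤ k + 1)]
      have h2 : (bs.take k ++ (bs[k] ++ [c]) :: bs.drop (k + 1)).drop (k + 1)
          = bs.drop (k + 1) := by
        rw [List.drop_append, hlen]
        simp [List.drop_of_length_le (by rw [hlen]; omega : (bs.take k).length ≤ k + 1)]
      rw [h1, h2, List.drop_eq_getElem_cons hlt]
      simp [mergeCol]

-- B's bucket fold is the column-merge fold
theorem foldB_eq : ∀ (L : List String) (bs : List (List Char)),
    L.foldl (fun bs s => (PySem.List.enumerate s.toList).foldl bstep bs) bs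
      = L.foldl (fun bs s => mergeCol bs s.toList) bs := by
  intro L
  induction L with
  | nil => intro bs; rfl
  | cons s L ih =>
    intro bs
    simp only [List.foldl_cons]
    rw [show (PySem.List.enumerate s.toList) = PySem.List.enumerate s.toList ((0 : Nat) : Int) by norm_num,
       fold_bstep s.toList bs 0 (Nat.zero_le _)]
    simp [ih]

theorem length_mergeCol : ∀ (bs : List (List Char)) (cs : List Char),
    (mergeCol bs cs).length = max bs.length cs.length := by
  intro bs
  induction bs with
  | nil =>
    intro cs; induction cs with
    | nil => simp [mergeCol]
    | cons c cs ih => simp [mergeCol, ih]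
  | cons b bs ih =>
    intro cs
    cases cs with
    | nil => simp [mergeCol]
    | cons c cs => simp only [mergeCol, List.length_cons, ih]; omega

theorem mergeCol_getElem? : ∀ (bs : List (List Char)) (cs : List Char) (i : Nat),
    (mergeCol bs cs)[i]? =
      match bs[i]?, cs[i]? with
      | none, none => none
      | some b, none => some b
      | none, some c => some [c]
      | some b, some c => some (b ++ [c]) := by
  intro bs
  induction bs with
  | nil =>
    intro cs
    induction cs with
    | nil => intro i; simp [mergeCol]
    | cons c cs ih =>
      intro i
      cases i with
      | zero => simp [mergeCol]
      | succ j => simpa [mergeCol] using ih j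
  | cons b bs ih =>
    intro cs i
    cases cs with
    | nil => cases h : (b :: bs)[i]? <;> simp [mergeCol, h]
    | cons c cs =>
      cases i with
      | zero => simp [mergeCol]
      | succ j => simpa [mergeCol] using ih cs j

-- the bucket list after processing L, starting from bs
theorem cols_getElem? : ∀ (L : List String) (bs : List (List Char)) (i : Nat),
    (L.foldl (fun bs s => mergeCol bs s.toList) bs)[i]? =
      match bs[i]? with
      | some b => some (b ++ colE L i)
      | none => if colE L i = [] then none else some (colE L i) := by
  intro L
  induction L with
  | nil => intro bs i; cases h : bs[i]? <;> simp [colE, h]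
  | cons s L ih =>
    intro bs i
    simp only [List.foldl_cons]
    rw [ih]
    rw [mergeCol_getElem?]
    have hcol : colE (s :: L) i =
        (match s.toList[i]? with | some c => c :: colE L i | none => colE L i) := by
      cases h : s.toList[i]? <;> simp [colE, h]
    cases hb : bs[i]? <;> cases hs : s.toList[i]? <;> simp [hcol, hs]

theorem cols_length : ∀ (L : List String) (bs : List (List Char)),
    (L.foldl (fun bs s => mergeCol bs s.toList) bs).length
      = L.foldl (fun m s => max m s.toList.length) bs.length := by
  intro L
  induction L with
  | nil => intro bs; rfl
  | cons s L ih => intro bs; simp only [List.foldl_cons]; rw [ih, length_mergeCol]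

theorem flatten_eq_flatMap_range : ∀ {α : Type} (xs : List (List α)),
    xs.flatten = (List.range xs.length).flatMap (fun i => xs[i]?.getD []) := by
  intro α xs
  induction xs with
  | nil => simp
  | cons b bs ih =>
    simp only [List.flatten_cons, List.length_cons, List.range_succ_eq_map,
      List.flatMap_cons, List.flatMap_map]
    simp only [List.getElem?_cons_zero, Option.getD_some]
    rw [ih]
    congr 1

-- A's inner loop over the strings produces exactly column i
theorem inner_loop_eq : ∀ (L : List String) (acc : List Char) (i : Nat),
    L.foldl (fun acc s => if i < s.toList.length then acc ++ [s.toList.getD i ' '] else acc) acc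
      = acc ++ colE L i := by
  intro L
  induction L with
  | nil => intro acc i; simp [colE]
  | cons s L ih =>
    intro acc i
    simp only [List.foldl_cons]
    by_cases h : i < s.toList.length
    · rw [if_pos h, ih]
      simp [colE, List.getElem?_eq_getElem h]
    · rw [if_neg h, ih]
      simp [colE, List.getElem?_eq_none_iff.mpr (Nat.le_of_not_lt h)]

-- max? of the lengths equals the running-max fold, for a nonempty list
theorem maxlen_eq (s : String) (L : List String) :
    (((s :: L).map (fun s => s.toList.length)).max?).getD 0
      = (s :: L).foldl (fun m t => max m t.toList.length) 0 := by
  simp only [List.map_cons, List.max?_cons, Option.elim, List.foldl_cons, Nat.zero_max]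
  cases h : (L.map (fun s => s.toList.length)).max? with
  | none =>
    have : L = [] := by
      cases L with
      | nil => rfl
      | cons t L => simp [List.max?_cons] at h
    simp [this]
  | some m =>
    simp only [Option.getD_some]
    have : ∀ (M : List Nat) (a : Nat), M.foldl max a = (M.max?.elim a (max a)) := by
      intro M
      induction M with
      | nil => intro a; simp
      | cons x M ih =>
        intro a
        simp only [List.foldl_cons, List.max?_cons, Option.elim]
        rw [ih]
        cases hM : M.max? <;> simp [Option.elim, Nat.max_assoc]
    have h2 := this (L.map (fun t => t.toList.length)) s.toList.length
    rw [h, Option.elim] at h2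
    rw [← h2, List.foldl_map]

-- ===== VERDICT (by name: the statement is the Claim_ definition above) =====
theorem custom_concatenate_spec : Claim_equal_custom_concatenate := by
  intro strings _
  unfold Spec_custom_concatenate custom_concatenate custom_concatenate_alt
  cases strings with
  | nil => rfl
  | cons s L =>
    simp only [if_neg (List.cons_ne_nil s L)]
    rw [foldB_eq]
    -- both sides are the reverse of the flatMap of the columns over the same range
    have hlen := cols_length (s :: L) []
    have hflat := flatten_eq_flatMap_range ((s :: L).foldl (fun bs t => mergeCol bs t.toList) [])
    rw [hflat, hlen]
    simp only [List.length_nil]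
    rw [maxlen_eq]
    simp only [inner_loop_eq]
    rw [PySem.List.foldl_append_eq_flatMap, List.nil_append]
    congr 2
    apply List.flatMap_congr
    intro i hi
    rw [cols_getElem?]
    simp only [List.getElem?_nil]
    have hi' : i < (s :: L).foldl (fun m t => max m t.toList.length) 0 := by
      simpa using List.mem_range.mp hi
    -- column i is nonempty: some string has length > i
    have hne : colE (s :: L) i ≠ [] := by
      intro hcol
      -- if every string is ≤ i long, the running max is ≤ i
      have hall : ∀ t ∈ (s :: L), t.toList.length ≤ i := by
        intro t ht
        by_contra hlt
        have : t.toList[i]? = some (t.toList.getD i ' ') := by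
          simp [List.getElem?_eq_getElem (Nat.lt_of_not_le hlt)]
        have : t.toList.getD i ' ' ∈ colE (s :: L) i := by
          apply List.mem_filterMap.mpr
          exact ⟨t, ht, this⟩
        simp [hcol] at this
      have : ∀ (M : List String) (a : Nat), (∀ t ∈ M, t.toList.length ≤ i) → a ≤ i →
          M.foldl (fun m t => max m t.toList.length) a ≤ i := by
        intro M
        induction M with
        | nil => intro a _ ha; simpa using ha
        | cons t M ih =>
          intro a hM ha
          simp only [List.foldl_cons]
          exact ih _ (fun u hu => hM u (List.mem_cons_of_mem t hu))
            (max_le ha (hM t (List.mem_cons_self)))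
      exact absurd hi' (Nat.not_lt.mpr (this (s :: L) 0 hall (Nat.zero_le i)))
    simp [hne]
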